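-- pv_equiv track=rewrite | github.com/gemnwong/Exa2api | main.py | _select_tool_name
-- ===== SOURCE A (Python) =====
-- from typing import List, Optional, Dict, Any
--
-- def _select_tool_name(tools: Any) -> str:
--     if not isinstance(tools, list) or not tools:
--         return "exa_search"
--     names: List[str] = []
--     for tool in tools:
--         if not isinstance(tool, dict):
--             continue
--         function = tool.get("function") if isinstance(tool.get("function"), dict) else {}
--         name = str(function.get("name") or "").strip()
--         if name:
--             names.append(name)
--     for preferred in ("exa_search", "search", "web_search"):
--         for name in names:
--             if preferred == name or preferred in name.lower():
--                 return name
--     return names[0] if names else "exa_search"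
-- ===== SOURCE B (Python) =====
-- def _select_tool_name(tools):
--     if not isinstance(tools, list) or not tools:
--         return "exa_search"
--     names = []
--     for tool in tools:
--         if not isinstance(tool, dict):
--             continue
--         function = tool.get("function") if isinstance(tool.get("function"), dict) else {}
--         name = str(function.get("name") or "").strip()
--         if name:
--             names.append(name)
--     if not names:
--         return "exa_search"
--     best = None  # (priority, index, name); smallest (priority, index) wins
--     for idx, name in enumerate(names):
--         low = name.lower()
--         pri = 3
--         for i, p in enumerate(("exa_search", "search", "web_search")):
--             if p == name or p in low:
--                 pri = i
--                 break
--         if best is None or (pri, idx) < (best[0], best[1]):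
--             best = (pri, idx, name)
--     return best[2]
-- ===== Notes on version B (the rewrite author's own statement) =====
-- stated objective: alternative
-- what changed: The nested preferred-outer/names-inner scan is replaced by a single keyed argmin pass over names: each name gets a priority (first matching preferred index, default 3) and the first name with the minimal priority is returned, with the default priority 3 subsuming the names[0] fallback.
import Mathlib
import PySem

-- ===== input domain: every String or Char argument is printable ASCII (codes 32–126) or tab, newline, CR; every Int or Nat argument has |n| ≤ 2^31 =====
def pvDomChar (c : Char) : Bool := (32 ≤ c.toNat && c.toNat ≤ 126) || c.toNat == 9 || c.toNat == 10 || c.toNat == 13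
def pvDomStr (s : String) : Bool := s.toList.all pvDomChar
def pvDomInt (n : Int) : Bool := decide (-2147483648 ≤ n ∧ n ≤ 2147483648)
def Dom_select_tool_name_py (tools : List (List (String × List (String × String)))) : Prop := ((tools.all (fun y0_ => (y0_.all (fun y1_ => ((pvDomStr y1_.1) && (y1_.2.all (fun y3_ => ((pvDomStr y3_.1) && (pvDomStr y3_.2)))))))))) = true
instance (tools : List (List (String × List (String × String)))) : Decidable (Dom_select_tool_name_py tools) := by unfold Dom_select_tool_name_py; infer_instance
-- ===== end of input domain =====

-- B replaces A's nested preferred/names loops by one argmin pass over names keyed by a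
-- per-name priority (first matching preferred index, default 3); same return value, similar cost.

-- ===== PORT A =====
-- shared by both ports: the names-building loop, identical in Source A and Source B
def pvBuildNames (tools : List (List (String × List (String × String)))) : List String :=
  tools.foldl (fun names tool =>
    let function := ((tool.find? (fun p => p.1 == "function")).map (·.2)).getD []
    let name := PySem.Str.strip (((function.find? (fun p => p.1 == "name")).map (·.2)).getD "")
    if name ≠ "" then names ++ [name] else names) []

-- A's inner loop: first name matching this preferred key
def pvInner (preferred : String) : List String → Option String
  | [] => none
  | n :: rest =>
    if preferred == n || PySem.Str.isIn preferred (PySem.Str.lower n) then some n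
    else pvInner preferred rest

-- A's outer loop over the preferred keys
def pvOuter : List String → List String → Option String
  | [], _ => none
  | p :: ps, names =>
    match pvInner p names with
    | some n => some n
    | none => pvOuter ps names

def select_tool_name_py (tools : List (List (String × List (String × String)))) : String :=
  if tools = [] then "exa_search"
  else
    let names := pvBuildNames tools
    match pvOuter ["exa_search", "search", "web_search"] names with
    | some n => n
    | none => match names with
      | n :: _ => n
      | [] => "exa_search"

-- ===== PORT B =====
-- Source B's inner break-loop: first preferred index matching this name, else 3
def pvPriLoop (name low : String) : List String → Nat → Nat
  | [], _ => 3
  | p :: ps, i =>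
    if p == name || PySem.Str.isIn p low then i
    else pvPriLoop name low ps (i + 1)

def pvPri (name : String) : Nat :=
  pvPriLoop name (PySem.Str.lower name) ["exa_search", "search", "web_search"] 0

-- Source B's argmin pass: keep the (priority, index, name) with smallest (priority, index)
def pvBest : List String → Nat → Option (Nat × Nat × String) → Option (Nat × Nat × String)
  | [], _, best => best
  | n :: rest, idx, best =>
    let pri := pvPri n
    let best' := match best with
      | none => some (pri, idx, n)
      | some (bp, bi, bn) =>
        if pri < bp || (pri == bp && idx < bi) then some (pri, idx, n) else some (bp, bi, bn)
    pvBest rest (idx + 1) best'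

def select_tool_name_py_alt (tools : List (List (String × List (String × String)))) : String :=
  if tools = [] then "exa_search"
  else
    let names := pvBuildNames tools
    if names = [] then "exa_search"
    else
      match pvBest names 0 none with
      | some (_, _, n) => n
      | none => "exa_search"   -- unreachable: names ≠ [] gives a some (totality default)

-- ===== PRECONDITION & SPEC =====
def Spec_select_tool_name_py (tools : List (List (String × List (String × String)))) (out : String) : Prop := out = select_tool_name_py_alt tools
instance (tools : List (List (String × List (String × String)))) (out : String) : Decidable (Spec_select_tool_name_py tools out) := by unfold Spec_select_tool_name_py; infer_instance

-- ===== CLAIM (what is proved, stated in full; the proofs are below) =====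
def Claim_equal_select_tool_name_py : Prop := ∀ (tools : List (List (String × List (String × String)))), Dom_select_tool_name_py tools → Spec_select_tool_name_py tools (select_tool_name_py tools)

-- ===== LEMMAS AND PROOFS =====

-- the three match predicates of A, as named abbreviations for the proofs
def pvM0 (n : String) : Bool := "exa_search" == n || PySem.Str.isIn "exa_search" (PySem.Str.lower n)
def pvM1 (n : String) : Bool := "search" == n || PySem.Str.isIn "search" (PySem.Str.lower n)
def pvM2 (n : String) : Bool := "web_search" == n || PySem.Str.isIn "web_search" (PySem.Str.lower n)

theorem pvPri_def (n : String) :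
    pvPri n = if pvM0 n then 0 else if pvM1 n then 1 else if pvM2 n then 2 else 3 := by
  simp [pvPri, pvPriLoop, pvM0, pvM1, pvM2]

-- "first minimizer" recursion that pvBest computes
def pvFmin (b : String) (bp : Nat) : List String → String
  | [] => b
  | n :: rest => if pvPri n < bp then pvFmin n (pvPri n) rest else pvFmin b bp rest

theorem pvBest_some : ∀ (names : List String) (idx bp bi : Nat) (bn : String), bi < idx →
    ∃ bp' bi', pvBest names idx (some (bp, bi, bn)) = some (bp', bi', pvFmin bn bp names) := by
  intro names
  induction names with
  | nil => intro idx bp bi bn _; exact ⟨bp, bi, rfl⟩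
  | cons n rest ih =>
    intro idx bp bi bn h
    simp only [pvBest, pvFmin]
    by_cases hlt : pvPri n < bp
    · have : (pvPri n < bp || (pvPri n == bp && idx < bi)) = true := by
        simp [hlt]
      rw [this]
      simp only [if_pos hlt]
      exact ih (idx + 1) (pvPri n) idx n (Nat.lt_succ_self idx)
    · have : (pvPri n < bp || (pvPri n == bp && idx < bi)) = false := by
        simp only [Bool.or_eq_false_iff, Bool.and_eq_false_iff]
        exact ⟨by simpa using hlt, Or.inr (by simp [Nat.not_lt.mpr (Nat.le_of_lt h)])⟩
      rw [this]
      simp only [if_neg hlt, Bool.false_eq_true]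
      exact ih (idx + 1) bp bi bn (Nat.lt_succ_of_lt h)

theorem pvFind?_congr_mem {α : Type} (l : List α) (p q : α → Bool)
    (h : ∀ x ∈ l, p x = q x) : l.find? p = l.find? q := by
  induction l with
  | nil => rfl
  | cons a l ih =>
    simp only [List.find?_cons]
    rw [h a (List.mem_cons_self ..)]
    cases hq : q a
    · simpa using ih (fun x hx => h x (List.mem_cons_of_mem _ hx))
    · rfl

theorem pvInner_eq_find? (p : String) (names : List String) :
    pvInner p names = names.find? (fun n => p == n || PySem.Str.isIn p (PySem.Str.lower n)) := by
  induction names with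
  | nil => rfl
  | cons n rest ih =>
    cases h : (p == n || PySem.Str.isIn p (PySem.Str.lower n)) with
    | true => simp only [pvInner, List.find?_cons, h]; simp
    | false => simp only [pvInner, List.find?_cons, h]; simp [ih]

-- pvPri value ↔ the match predicates
theorem pvPri_eq_zero (n : String) : (pvPri n == 0) = pvM0 n := by
  rw [pvPri_def]; split_ifs with h0 h1 h2 <;> simp [h0, *]

theorem pvPri_eq_one (n : String) (h0 : pvM0 n = false) : (pvPri n == 1) = pvM1 n := by
  rw [pvPri_def]; split_ifs with ha hb hc <;> simp_all

theorem pvPri_eq_two (n : String) (h0 : pvM0 n = false) (h1 : pvM1 n = false) :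
    (pvPri n == 2) = pvM2 n := by
  rw [pvPri_def]; split_ifs with ha hb hc <;> simp_all

-- pvFmin at the four concrete cutoff values
theorem pvFmin_zero : ∀ (rest : List String) (b : String), pvFmin b 0 rest = b := by
  intro rest
  induction rest with
  | nil => intro b; rfl
  | cons n r ih => intro b; simp only [pvFmin, Nat.not_lt_zero, if_false]; exact ih b

theorem pvFmin_one : ∀ (rest : List String) (b : String),
    pvFmin b 1 rest = ((rest.find? (fun n => pvPri n == 0)).getD b) := by
  intro rest
  induction rest with
  | nil => intro b; rfl
  | cons n r ih =>
    intro b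
    simp only [pvFmin, List.find?_cons]
    by_cases h : pvPri n < 1
    · have h0 : pvPri n = 0 := by omega
      simp [h0, pvFmin_zero]
    · have h0 : (pvPri n == 0) = false := by simp; omega
      simp only [if_neg h, h0]
      exact ih b

theorem pvFmin_two : ∀ (rest : List String) (b : String),
    pvFmin b 2 rest = (match rest.find? (fun n => pvPri n == 0) with
      | some m => m
      | none => (rest.find? (fun n => pvPri n == 1)).getD b) := by
  intro rest
  induction rest with
  | nil => intro b; rfl
  | cons n r ih =>
    intro b
    simp only [pvFmin, List.find?_cons]
    by_cases h : pvPri n < 2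
    · have h' : pvPri n = 0 ∨ pvPri n = 1 := by omega
      rcases h' with h0 | h1
      · simp [h0, pvFmin_zero]
      · have q0 : (pvPri n == 0) = false := by simp [h1]
        simp only [if_pos h, h1, q0, pvFmin_one]
        cases hf : r.find? (fun n => pvPri n == 0) <;> simp [hf]
    · have q0 : (pvPri n == 0) = false := by simp; omega
      have q1 : (pvPri n == 1) = false := by simp; omega
      simp only [if_neg h, q0, q1]
      exact ih b

theorem pvFmin_three : ∀ (rest : List String) (b : String),
    pvFmin b 3 rest = (match rest.find? (fun n => pvPri n == 0) with
      | some m => m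
      | none => match rest.find? (fun n => pvPri n == 1) with
        | some m => m
        | none => (rest.find? (fun n => pvPri n == 2)).getD b) := by
  intro rest
  induction rest with
  | nil => intro b; rfl
  | cons n r ih =>
    intro b
    simp only [pvFmin, List.find?_cons]
    by_cases h : pvPri n < 3
    · have h' : pvPri n = 0 ∨ pvPri n = 1 ∨ pvPri n = 2 := by omega
      rcases h' with h0 | h1 | h2
      · simp [h0, pvFmin_zero]
      · have q0 : (pvPri n == 0) = false := by simp [h1]
        simp only [if_pos h, h1, q0, pvFmin_one]
        cases hf : r.find? (fun n => pvPri n == 0) <;> simp [hf]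
      · have q0 : (pvPri n == 0) = false := by simp [h2]
        have q1 : (pvPri n == 1) = false := by simp [h2]
        simp only [if_pos h, h2, q0, q1, pvFmin_two]
        cases hf0 : r.find? (fun n => pvPri n == 0) <;>
          cases hf1 : r.find? (fun n => pvPri n == 1) <;> simp [hf0, hf1]
    · have q0 : (pvPri n == 0) = false := by simp; omega
      have q1 : (pvPri n == 1) = false := by simp; omega
      have q2 : (pvPri n == 2) = false := by simp; omega
      simp only [if_neg h, q0, q1, q2]
      exact ih b

-- A's value on a nonempty names list equals B's first-minimizer
theorem pvAval_eq (rest : List String) (b : String) :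
    (match pvOuter ["exa_search", "search", "web_search"] (b :: rest) with
      | some n => n
      | none => b) = pvFmin b (pvPri b) rest := by
  have e0 : (fun n => "exa_search" == n || PySem.Str.isIn "exa_search" (PySem.Str.lower n)) = pvM0 := rfl
  have e1 : (fun n => "search" == n || PySem.Str.isIn "search" (PySem.Str.lower n)) = pvM1 := rfl
  have e2 : (fun n => "web_search" == n || PySem.Str.isIn "web_search" (PySem.Str.lower n)) = pvM2 := rfl
  have c0 : rest.find? (fun n => pvPri n == 0) = rest.find? pvM0 :=
    pvFind?_congr_mem rest _ _ (fun x _ => pvPri_eq_zero x)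
  simp only [pvOuter, pvInner_eq_find?, e0, e1, e2, List.find?_cons]
  by_cases h0 : pvM0 b
  · have hpri : pvPri b = 0 := by rw [pvPri_def]; simp [h0]
    rw [hpri]
    simp [h0, pvFmin_zero]
  · simp only [Bool.not_eq_true] at h0
    by_cases h1 : pvM1 b
    · have hpri : pvPri b = 1 := by rw [pvPri_def]; simp [h0, h1]
      rw [hpri, pvFmin_one, c0]
      simp only [h0, h1]
      cases hf : rest.find? pvM0 <;> simp [hf]
    · simp only [Bool.not_eq_true] at h1
      by_cases h2 : pvM2 b
      · have hpri : pvPri b = 2 := by rw [pvPri_def]; simp [h0, h1, h2]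
        rw [hpri, pvFmin_two, c0]
        simp only [h0, h1, h2]
        cases hf0 : rest.find? pvM0 with
        | some m => simp [hf0]
        | none =>
          have hall0 : ∀ x ∈ rest, pvM0 x = false := by
            intro x hx
            simpa using List.find?_eq_none.mp hf0 x hx
          have c1 : rest.find? (fun n => pvPri n == 1) = rest.find? pvM1 :=
            pvFind?_congr_mem rest _ _ (fun x hx => pvPri_eq_one x (hall0 x hx))
          rw [c1]
          simp only [hf0]
          cases hf1 : rest.find? pvM1 <;> simp [hf1]
      · simp only [Bool.not_eq_true] at h2
        have hpri : pvPri b = 3 := by rw [pvPri_def]; simp [h0, h1, h2]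
        rw [hpri, pvFmin_three, c0]
        simp only [h0, h1, h2]
        cases hf0 : rest.find? pvM0 with
        | some m => simp [hf0]
        | none =>
          have hall0 : ∀ x ∈ rest, pvM0 x = false := by
            intro x hx
            simpa using List.find?_eq_none.mp hf0 x hx
          have c1 : rest.find? (fun n => pvPri n == 1) = rest.find? pvM1 :=
            pvFind?_congr_mem rest _ _ (fun x hx => pvPri_eq_one x (hall0 x hx))
          rw [c1]
          simp only [hf0]
          cases hf1 : rest.find? pvM1 with
          | some m => simp [hf1]
          | none =>
            have hall1 : ∀ x ∈ rest, pvM1 x = false := by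
              intro x hx
              simpa using List.find?_eq_none.mp hf1 x hx
            have c2 : rest.find? (fun n => pvPri n == 2) = rest.find? pvM2 :=
              pvFind?_congr_mem rest _ _ (fun x hx => pvPri_eq_two x (hall0 x hx) (hall1 x hx))
            rw [c2]
            simp only [hf1]
            cases hf2 : rest.find? pvM2 <;> simp [hf2]

-- ===== VERDICT (by name: the statement is the Claim_ definition above) =====
theorem select_tool_name_py_spec : Claim_equal_select_tool_name_py := by
  intro tools _
  unfold Spec_select_tool_name_py
  unfold select_tool_name_py select_tool_name_py_alt
  by_cases ht : tools = []
  · simp [ht]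
  · simp only [if_neg ht]
    cases hn : pvBuildNames tools with
    | nil => simp [pvOuter, pvInner]
    | cons n0 rest =>
      have hne : (n0 :: rest : List String) ≠ [] := by simp
      simp only [if_neg hne]
      obtain ⟨bp', bi', hb⟩ := pvBest_some rest 1 (pvPri n0) 0 n0 Nat.one_pos
      have : pvBest (n0 :: rest) 0 none = some (bp', bi', pvFmin n0 (pvPri n0) rest) := by
        simpa [pvBest] using hb
      rw [this]
      simpa using pvAval_eq rest n0
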